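-- pv_equiv track=rewrite | github.com/Sp0utn1k/market_env | market_env/utils.py | parse_instrument_name
-- ===== SOURCE A (Python) =====
-- from typing import Dict, List, Tuple
--
-- BASE_CURRENCIES = [
--     'BTC', 'USD', 'EUR', 'USDT', 'ETH', 'AUD', 'GBP', 'CHF', 'CAD',
--     'USDC', 'JPY', 'DAI', 'AED', '.SETH', 'XBT', 'POL', 'DOT'
-- ]
--
-- def parse_instrument_name(name: str) -> Tuple[str, str]:
--     """
--     Parses an instrument name to extract quote and base currencies.
--
--     Args:
--         name (str): Instrument name.
--
--     Returns:
--         Tuple[str, str]: (quote_currency, base_currency)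
--     """
--     # Check if name contains a dot notation
--     if '.' in name:
--         return tuple(name.split('.'))
--
--     # Try to match known base currencies at the end of the name
--     for base_currency in sorted(BASE_CURRENCIES, key=len, reverse=True):
--         if name.endswith(base_currency):
--             quote_currency = name[:-len(base_currency)]
--             return quote_currency, base_currency
--
--     # If no known base currency is found, raise an error
--     raise ValueError(f"Cannot parse instrument name '{name}'. Unknown base currency.")
-- ===== SOURCE B (Python) =====
-- BASES_4 = {'USDT', 'USDC'}
-- BASES_3 = {'BTC', 'USD', 'EUR', 'ETH', 'AUD', 'GBP', 'CHF', 'CAD',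
--            'JPY', 'DAI', 'AED', 'XBT', 'POL', 'DOT'}
-- # The one currency that itself contains a dot needs no suffix check: any name containing it
-- # has a dot and takes the dot branch.
--
-- def parse_instrument_name(name: str):
--     if '.' in name:
--         return tuple(name.split('.'))
--     tail4 = name[-4:]
--     if tail4 in BASES_4:
--         return name[:-4], tail4
--     tail3 = name[-3:]
--     if tail3 in BASES_3:
--         return name[:-3], tail3
--     raise ValueError(f"Cannot parse instrument name '{name}'. Unknown base currency.")
-- ===== Notes on version B (the rewrite author's own statement) =====
-- stated objective: simpler
-- what changed: Replaces A's per-call sort of the 17 currencies and the linear endswith scan with two constant suffix-set membership tests (length 4, then length 3); the dot branch stays as in A and subsumes the one currency that itself contains a dot.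
-- outside the precondition, e.g. on parse_instrument_name('A.B.C'): A returns ('A', 'B', 'C'), B returns ('A', 'B', 'C')
import Mathlib
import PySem

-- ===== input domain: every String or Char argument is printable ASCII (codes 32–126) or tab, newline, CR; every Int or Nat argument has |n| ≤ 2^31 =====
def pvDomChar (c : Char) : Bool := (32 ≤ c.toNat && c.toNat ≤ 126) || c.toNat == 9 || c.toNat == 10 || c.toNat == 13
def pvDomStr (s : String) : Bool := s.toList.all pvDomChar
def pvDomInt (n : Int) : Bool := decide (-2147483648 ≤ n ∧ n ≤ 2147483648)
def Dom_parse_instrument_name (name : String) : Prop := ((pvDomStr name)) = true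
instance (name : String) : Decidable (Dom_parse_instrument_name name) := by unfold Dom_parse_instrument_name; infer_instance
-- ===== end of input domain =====

-- B replaces A's per-call sort of the currency list and endswith scan by two fixed
-- suffix-set membership tests (length 4, then length 3); the dot branch is unchanged
-- (the one dotted currency is subsumed by it). Objective: simpler.


-- ===== PORT A =====
def pvBaseCurrencies : List String :=
  ["BTC", "USD", "EUR", "USDT", "ETH", "AUD", "GBP", "CHF", "CAD",
   "USDC", "JPY", "DAI", "AED", ".SETH", "XBT", "POL", "DOT"]

-- the 'for base_currency in sorted(...)' loop with its early return; [] = the ValueError (excluded by Pre_)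
def pvALoop (name : String) : List String → String × String
  | [] => ("", "")
  | c :: rest =>
      if PySem.Str.endswith name c then
        (PySem.Str.slice name none (some (-(PySem.Str.len c : Int))), c)
      else pvALoop name rest

def parse_instrument_name (name : String) : String × String :=
  if PySem.Str.isIn "." name then
    -- tuple(name.split('.')); a result that is not a pair is outside Pre_
    match PySem.Str.split? name "." with
    | some [a, b] => (a, b)
    | _ => ("", "")
  else
    pvALoop name (PySem.List.sorted pvBaseCurrencies (fun s => PySem.Str.len s) true)

-- ===== PORT B =====
def pvBases4 : List String := ["USDT", "USDC"]
def pvBases3 : List String :=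
  ["BTC", "USD", "EUR", "ETH", "AUD", "GBP", "CHF", "CAD",
   "JPY", "DAI", "AED", "XBT", "POL", "DOT"]

def parse_instrument_name_alt (name : String) : String × String :=
  if PySem.Str.isIn "." name then
    -- tuple(name.split('.')); split? is some for the non-empty separator ".";
    -- a split with a number of parts other than 2 is not a pair: outside Pre_
    let parts := (PySem.Str.split? name ".").getD []
    if parts.length = 2 then (parts[0]!, parts[1]!) else ("", "")
  else
    let tail4 := PySem.Str.slice name (some (-4)) none
    if pvBases4.contains tail4 then (PySem.Str.slice name none (some (-4)), tail4)
    else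
      let tail3 := PySem.Str.slice name (some (-3)) none
      if pvBases3.contains tail3 then (PySem.Str.slice name none (some (-3)), tail3)
      else ("", "")  -- the ValueError (excluded by Pre_)

-- ===== PRECONDITION & SPEC =====
-- Pre_ excludes names with no dot and no known currency suffix (A raises ValueError) and
-- names with two or more dots, where A returns a split tuple that is not a pair (outside
-- the declared return type Tuple[str, str]).
def Pre_parse_instrument_name (name : String) : Prop :=
  (PySem.Str.isIn "." name = true ∧ PySem.Str.count name "." = 1) ∨
  (PySem.Str.isIn "." name = false ∧
    (PySem.Str.slice name (some (-4)) none ∈ (["USDT", "USDC"] : List String) ∨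
     PySem.Str.slice name (some (-3)) none ∈
       (["BTC", "USD", "EUR", "ETH", "AUD", "GBP", "CHF", "CAD",
         "JPY", "DAI", "AED", "XBT", "POL", "DOT"] : List String)))
instance (name : String) : Decidable (Pre_parse_instrument_name name) := by
  unfold Pre_parse_instrument_name; infer_instance

def pvWitness_parse_instrument_name : String := "PF_XBTUSD"

def Spec_parse_instrument_name (name : String) (out : String × String) : Prop :=
  out = parse_instrument_name_alt name
instance (name : String) (out : String × String) : Decidable (Spec_parse_instrument_name name out) := by
  unfold Spec_parse_instrument_name; infer_instance

-- ===== CLAIM (what is proved, stated in full; the proofs are below) =====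
def Claim_equal_parse_instrument_name : Prop :=
  ∀ (name : String), Dom_parse_instrument_name name → Pre_parse_instrument_name name →
    Spec_parse_instrument_name name (parse_instrument_name name)

-- ===== LEMMAS AND PROOFS =====

-- endswith by a k-char suffix is equality of the last-k slice with it
theorem pv_endswith_slice (s c : String) (k : Nat) (hk : c.toList.length = k) (hpos : 0 < k) :
    PySem.Str.endswith s c = decide (PySem.Str.slice s (some (-(k : Int))) none = c) := by
  have h1 : PySem.Str.slice s (some (-(k : Int))) none = c ↔
      s.toList.drop (s.toList.length - k) = c.toList := by
    rw [← String.toList_inj, PySem.Str.toList_slice, PySem.Chars.slice_eq_listSlice,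
        PySem.List.slice_from_neg_natCast _ k hpos]
  rw [PySem.Str.endswith_eq]
  by_cases h : c.toList <:+ s.toList
  · have hd : s.toList.drop (s.toList.length - k) = c.toList := by
      obtain ⟨t, ht⟩ := h
      have hl : s.toList.length - k = t.length := by
        rw [← ht, ← hk, List.length_append]; omega
      rw [hl, ← ht, List.drop_left]
    have he : PySem.Chars.endswith s.toList c.toList = true :=
      (PySem.Chars.endswith_iff _ _).mpr h
    rw [he]
    exact (decide_eq_true (h1.mpr hd)).symm
  · have hd : ¬ s.toList.drop (s.toList.length - k) = c.toList :=
      fun he => h (he ▸ List.drop_suffix _ _)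
    have he : PySem.Chars.endswith s.toList c.toList = false := by
      rcases hb : PySem.Chars.endswith s.toList c.toList
      · rfl
      · exact absurd ((PySem.Chars.endswith_iff _ _).mp hb) h
    rw [he]
    exact (decide_eq_false (fun hx => hd (h1.mp hx))).symm

-- a name without a dot cannot end with '.SETH'
theorem pv_nodot_seth (s : String) (h : PySem.Str.isIn "." s = false) :
    PySem.Str.endswith s ".SETH" = false := by
  by_cases hc : PySem.Str.endswith s ".SETH" = true
  · exfalso
    have hsuf : (".SETH").toList <:+ s.toList := by
      rw [PySem.Str.endswith_eq] at hc
      exact (PySem.Chars.endswith_iff _ _).mp hc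
    have hin : PySem.Chars.isIn (".").toList s.toList = false := by
      rw [PySem.Str.isIn_eq] at h; exact h
    have hpre : (".").toList <+: (".SETH").toList := by decide
    exact absurd (hpre.isInfix.trans hsuf.isInfix)
      ((PySem.Chars.isIn_eq_false_iff _ _).mp hin)
  · simpa using hc

theorem pv_sorted_eval :
    PySem.List.sorted pvBaseCurrencies (fun s => PySem.Str.len s) true =
      [".SETH", "USDT", "USDC", "BTC", "USD", "EUR", "ETH", "AUD", "GBP",
       "CHF", "CAD", "JPY", "DAI", "AED", "XBT", "POL", "DOT"] := by decide

-- ===== VERDICT (by name: the statement is the Claim_ definition above) =====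
set_option maxHeartbeats 4000000 in
theorem parse_instrument_name_spec : Claim_equal_parse_instrument_name := by
  unfold Claim_equal_parse_instrument_name
  intro name hDom hPre
  unfold Spec_parse_instrument_name
  by_cases hdot : PySem.Str.isIn "." name = true
  · simp only [parse_instrument_name, parse_instrument_name_alt, hdot, if_true]
    rcases hsp : PySem.Str.split? name "." with _ | parts
    · simp
    · rcases parts with _ | ⟨a, _ | ⟨b, _ | ⟨c, rest⟩⟩⟩ <;> simp
  · have hdf : PySem.Str.isIn "." name = false := by
      revert hdot; cases PySem.Str.isIn "." name <;> simp
    have L4T : PySem.Str.len "USDT" = 4 := by decide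
    have L4C : PySem.Str.len "USDC" = 4 := by decide
    have e5 := pv_nodot_seth name hdf
    have e4T := pv_endswith_slice name "USDT" 4 (by decide) (by omega)
    have e4C := pv_endswith_slice name "USDC" 4 (by decide) (by omega)
    have eBTC := pv_endswith_slice name "BTC" 3 (by decide) (by omega)
    have eUSD := pv_endswith_slice name "USD" 3 (by decide) (by omega)
    have eEUR := pv_endswith_slice name "EUR" 3 (by decide) (by omega)
    have eETH := pv_endswith_slice name "ETH" 3 (by decide) (by omega)
    have eAUD := pv_endswith_slice name "AUD" 3 (by decide) (by omega)
    have eGBP := pv_endswith_slice name "GBP" 3 (by decide) (by omega)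
    have eCHF := pv_endswith_slice name "CHF" 3 (by decide) (by omega)
    have eCAD := pv_endswith_slice name "CAD" 3 (by decide) (by omega)
    have eJPY := pv_endswith_slice name "JPY" 3 (by decide) (by omega)
    have eDAI := pv_endswith_slice name "DAI" 3 (by decide) (by omega)
    have eAED := pv_endswith_slice name "AED" 3 (by decide) (by omega)
    have eXBT := pv_endswith_slice name "XBT" 3 (by decide) (by omega)
    have ePOL := pv_endswith_slice name "POL" 3 (by decide) (by omega)
    have eDOT := pv_endswith_slice name "DOT" 3 (by decide) (by omega)
    have MBTC : PySem.Str.len "BTC" = 3 := by decide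
    have MUSD : PySem.Str.len "USD" = 3 := by decide
    have MEUR : PySem.Str.len "EUR" = 3 := by decide
    have METH : PySem.Str.len "ETH" = 3 := by decide
    have MAUD : PySem.Str.len "AUD" = 3 := by decide
    have MGBP : PySem.Str.len "GBP" = 3 := by decide
    have MCHF : PySem.Str.len "CHF" = 3 := by decide
    have MCAD : PySem.Str.len "CAD" = 3 := by decide
    have MJPY : PySem.Str.len "JPY" = 3 := by decide
    have MDAI : PySem.Str.len "DAI" = 3 := by decide
    have MAED : PySem.Str.len "AED" = 3 := by decide
    have MXBT : PySem.Str.len "XBT" = 3 := by decide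
    have MPOL : PySem.Str.len "POL" = 3 := by decide
    have MDOT : PySem.Str.len "DOT" = 3 := by decide
    unfold parse_instrument_name parse_instrument_name_alt
    rw [pv_sorted_eval]
    simp only [hdf, Bool.false_eq_true, if_false]
    simp only [pvALoop]
    simp only [e5, Bool.false_eq_true, if_false]
    simp only [e4T, e4C, eBTC, eUSD, eEUR, eETH, eAUD, eGBP, eCHF, eCAD, eJPY,
      eDAI, eAED, eXBT, ePOL, eDOT]
    simp only [L4T, L4C, MBTC, MUSD, MEUR, METH, MAUD, MGBP, MCHF, MCAD, MJPY,
      MDAI, MAED, MXBT, MPOL, MDOT]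
    simp only [Nat.cast_ofNat, decide_eq_true_eq]
    simp only [pvBases4, pvBases3, List.contains_eq_mem, List.mem_cons,
      List.not_mem_nil, or_false, decide_eq_true_eq]
    by_cases h1 : PySem.Str.slice name (some (-4)) none = "USDT"
    · simp [h1]
    by_cases h2 : PySem.Str.slice name (some (-4)) none = "USDC"
    · simp [h2]
    by_cases g1 : PySem.Str.slice name (some (-3)) none = "BTC"
    · simp [h1, h2, g1]
    by_cases g2 : PySem.Str.slice name (some (-3)) none = "USD"
    · simp [h1, h2, g2]
    by_cases g3 : PySem.Str.slice name (some (-3)) none = "EUR"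
    · simp [h1, h2, g3]
    by_cases g4 : PySem.Str.slice name (some (-3)) none = "ETH"
    · simp [h1, h2, g4]
    by_cases g5 : PySem.Str.slice name (some (-3)) none = "AUD"
    · simp [h1, h2, g5]
    by_cases g6 : PySem.Str.slice name (some (-3)) none = "GBP"
    · simp [h1, h2, g6]
    by_cases g7 : PySem.Str.slice name (some (-3)) none = "CHF"
    · simp [h1, h2, g7]
    by_cases g8 : PySem.Str.slice name (some (-3)) none = "CAD"
    · simp [h1, h2, g8]
    by_cases g9 : PySem.Str.slice name (some (-3)) none = "JPY"
    · simp [h1, h2, g9]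
    by_cases g10 : PySem.Str.slice name (some (-3)) none = "DAI"
    · simp [h1, h2, g10]
    by_cases g11 : PySem.Str.slice name (some (-3)) none = "AED"
    · simp [h1, h2, g11]
    by_cases g12 : PySem.Str.slice name (some (-3)) none = "XBT"
    · simp [h1, h2, g12]
    by_cases g13 : PySem.Str.slice name (some (-3)) none = "POL"
    · simp [h1, h2, g13]
    by_cases g14 : PySem.Str.slice name (some (-3)) none = "DOT"
    · simp [h1, h2, g14]
    simp [h1, h2, g1, g2, g3, g4, g5, g6, g7, g8, g9, g10, g11, g12, g13, g14]
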